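-- pv_equiv track=rewrite | github.com/SidoJain/AOC-2025 | d6p1.py | solve_cephalopod_worksheet
-- ===== SOURCE A (Python) =====
-- def solve_cephalopod_worksheet(worksheet: list[str]) -> int:
--     rows = [row.split() for row in worksheet if row.strip()]
--     num_problems = len(rows[-1])
--     problems = []
--     for col in range(num_problems):
--         nums = []
--         for row in rows[:-1]:
--             if col < len(row):
--                 nums.append(int(row[col]))
--         op = rows[-1][col]
--         problems.append((nums, op))
--
--     answers = []
--     for nums, op in problems:
--         result = 1
--         if op == '+':
--             result = sum(nums)
--         elif op == '*':
--             for num in nums: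
--                 result *= num
--         answers.append(result)
--     return sum(answers)
-- ===== SOURCE B (Python) =====
-- def solve_cephalopod_worksheet(worksheet: list[str]) -> int:
--     rows = [row.split() for row in worksheet if row.strip()]
--     ops = rows[-1]
--     n = len(ops)
--     results = [0 if op == '+' else 1 for op in ops]
--     for row in rows[:-1]:
--         for col in range(min(len(row), n)):
--             v = int(row[col])
--             if ops[col] == '+':
--                 results[col] += v
--             elif ops[col] == '*':
--                 results[col] *= v
--     return sum(results)
-- ===== Notes on version B (the rewrite author's own statement) =====
-- stated objective: alternative
-- what changed: Replaces A's column-major collect-then-reduce (build a number list per column, then apply the operator) with a single row-major pass that folds each cell directly into a per-column running accumulator initialized from the operator row.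
import Mathlib
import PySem

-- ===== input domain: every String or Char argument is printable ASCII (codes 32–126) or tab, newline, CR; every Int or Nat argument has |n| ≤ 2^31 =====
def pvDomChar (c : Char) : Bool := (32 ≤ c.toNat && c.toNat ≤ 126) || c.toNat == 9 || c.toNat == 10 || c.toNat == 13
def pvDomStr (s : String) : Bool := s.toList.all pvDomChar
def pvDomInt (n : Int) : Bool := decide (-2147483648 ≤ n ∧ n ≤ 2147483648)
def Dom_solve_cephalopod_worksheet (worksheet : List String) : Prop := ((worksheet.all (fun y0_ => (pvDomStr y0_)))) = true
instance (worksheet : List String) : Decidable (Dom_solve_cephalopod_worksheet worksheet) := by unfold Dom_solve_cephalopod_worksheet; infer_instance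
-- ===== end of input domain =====

-- B replaces A's column-major "collect each column, then reduce" with one row-major pass
-- over running per-column accumulators (objective: alternative decomposition, same cost).

-- rows = [row.split() for row in worksheet if row.strip()]  (shared by both ports)
def pvRows (worksheet : List String) : List (List String) :=
  (worksheet.filter (fun r => !(PySem.Str.strip r == ""))).map (fun r => PySem.Str.split₀ r)

-- ===== PORT A =====
-- rows[-1] is rows.getLastD [] (the IndexError on empty rows is excluded by Pre_);
-- rows[:-1] is rows.dropLast; int(cell) is PySem.Int.ofStr? (ValueError excluded by Pre_,
-- so .getD 0 is never taken on admitted inputs); row[col] is guarded by col < len(row).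
def solve_cephalopod_worksheet (worksheet : List String) : Int :=
  let rows := pvRows worksheet
  let last := rows.getLastD []
  let numProblems := last.length
  let dataRows := rows.dropLast
  let problems := (List.range numProblems).map (fun col =>
    (dataRows.foldl (fun acc row =>
        if col < row.length then acc ++ [(PySem.Int.ofStr? (row.getD col "")).getD 0] else acc) [],
     last.getD col ""))
  let answers := problems.map (fun p =>
    if p.2 = "+" then p.1.sum
    else if p.2 = "*" then p.1.foldl (· * ·) 1
    else (1 : Int))
  answers.sum

-- ===== PORT B =====
-- same index/conversion conventions as the port of A (exact on inputs admitted by Pre_)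
def solve_cephalopod_worksheet_alt (worksheet : List String) : Int :=
  let rows := pvRows worksheet
  let ops := rows.getLastD []
  let init := ops.map (fun op => if op = "+" then (0 : Int) else 1)
  let results := rows.dropLast.foldl (fun res row =>
    (List.range (min row.length ops.length)).foldl (fun res col =>
      if ops.getD col "" = "+" then res.set col (res.getD col 0 + (PySem.Int.ofStr? (row.getD col "")).getD 0)
      else if ops.getD col "" = "*" then res.set col (res.getD col 0 * (PySem.Int.ofStr? (row.getD col "")).getD 0)
      else res) res) init
  results.sum

-- ===== PRECONDITION & SPEC =====
-- Pre_ excludes exactly the inputs where the Python A raises: no nonblank row at all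
-- (IndexError on rows[-1]), or a cell that int() cannot parse in a data row at a column
-- the loops reach (ValueError). B raises on exactly the same inputs.
def Pre_solve_cephalopod_worksheet (worksheet : List String) : Prop :=
  pvRows worksheet ≠ [] ∧
  ∀ row ∈ (pvRows worksheet).dropLast,
    ∀ cell ∈ row.take ((pvRows worksheet).getLastD []).length,
      (PySem.Int.ofStr? cell).isSome = true
instance (worksheet : List String) : Decidable (Pre_solve_cephalopod_worksheet worksheet) := by
  unfold Pre_solve_cephalopod_worksheet; infer_instance

def pvWitness_solve_cephalopod_worksheet : List String := ["1 2", "3 4", "+ *"]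

def Spec_solve_cephalopod_worksheet (worksheet : List String) (out : Int) : Prop := out = solve_cephalopod_worksheet_alt worksheet
instance (worksheet : List String) (out : Int) : Decidable (Spec_solve_cephalopod_worksheet worksheet out) := by unfold Spec_solve_cephalopod_worksheet; infer_instance

-- ===== CLAIM (what is proved, stated in full; the proofs are below) =====
def Claim_equal_solve_cephalopod_worksheet : Prop := ∀ (worksheet : List String), Dom_solve_cephalopod_worksheet worksheet → Pre_solve_cephalopod_worksheet worksheet → Spec_solve_cephalopod_worksheet worksheet (solve_cephalopod_worksheet worksheet)

-- ===== LEMMAS AND PROOFS =====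

-- value of a cell as both ports read it
def pvVal (row : List String) (c : Nat) : Int := (PySem.Int.ofStr? (row.getD c "")).getD 0

-- A's per-column number list
def pvCol (dataRows : List (List String)) (c : Nat) : List Int :=
  dataRows.foldl (fun acc row => if c < row.length then acc ++ [pvVal row c] else acc) []

-- A's reduction of one column
def pvRed (op : String) (nums : List Int) : Int :=
  if op = "+" then nums.sum else if op = "*" then nums.foldl (· * ·) 1 else 1

-- B's single-cell update on the accumulator value
def pvStep (ops row : List String) (c : Nat) (x : Int) : Int :=
  if ops.getD c "" = "+" then x + pvVal row c
  else if ops.getD c "" = "*" then x * pvVal row c else x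

theorem pvGetD_map_range (g : Nat → Int) {n m : Nat} (_h : m < n) :
    ((List.range n).map g).getD m 0 = g m := by
  simp [List.getD_eq_getElem?_getD, _h]

theorem pvSet_map_range (g : Nat → Int) {n m : Nat} (_h : m < n) (x : Int) :
    ((List.range n).map g).set m x = (List.range n).map (fun c => if c = m then x else g c) := by
  apply List.ext_getElem
  · simp
  · intro i h1 h2
    simp only [List.length_set, List.length_map, List.length_range] at h1
    by_cases hi : i = m
    · simp [List.getElem_map, List.getElem_range, hi]
    · simp [List.getElem_map, List.getElem_range, hi, Ne.symm hi]

theorem pvRed_append (op : String) (nums : List Int) (v : Int) :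
    pvRed op (nums ++ [v]) =
      (if op = "+" then pvRed op nums + v
       else if op = "*" then pvRed op nums * v else pvRed op nums) := by
  unfold pvRed; split_ifs <;> simp [List.sum_append, List.foldl_append]

theorem pvCol_append (rs : List (List String)) (row : List String) (c : Nat) :
    pvCol (rs ++ [row]) c =
      pvCol rs c ++ (if c < row.length then [pvVal row c] else []) := by
  simp only [pvCol, List.foldl_append, List.foldl_cons, List.foldl_nil]
  split_ifs <;> simp

theorem pvInner_eq (ops row : List String) (G : Nat → Int) :
    ∀ m, m ≤ ops.length →
      (List.range m).foldl (fun res col =>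
          if ops.getD col "" = "+" then res.set col (res.getD col 0 + (PySem.Int.ofStr? (row.getD col "")).getD 0)
          else if ops.getD col "" = "*" then res.set col (res.getD col 0 * (PySem.Int.ofStr? (row.getD col "")).getD 0)
          else res) ((List.range ops.length).map G)
        = (List.range ops.length).map (fun c => if c < m then pvStep ops row c (G c) else G c) := by
  intro m
  induction m with
  | zero => intro _; simp
  | succ m ih =>
    intro hm
    rw [List.range_succ, List.foldl_append, ih (by omega), List.foldl_cons, List.foldl_nil]
    have hmn : m < ops.length := by omega
    have hG : ((List.range ops.length).map
        (fun c => if c < m then pvStep ops row c (G c) else G c)).getD m 0 = G m := by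
      rw [pvGetD_map_range _ hmn]; simp
    by_cases hp : ops.getD m "" = "+"
    · rw [if_pos hp, hG, pvSet_map_range _ hmn]
      apply List.map_congr_left; intro c _
      by_cases hc : c = m
      · rw [hc, if_pos rfl, if_pos (Nat.lt_succ_self m)]
        simp only [pvStep, pvVal]
        rw [if_pos hp]
      · rw [if_neg hc]
        by_cases hlt : c < m
        · rw [if_pos hlt, if_pos (by omega : c < m + 1)]
        · rw [if_neg hlt, if_neg (by omega : ¬ c < m + 1)]
    · by_cases hs : ops.getD m "" = "*"
      · rw [if_neg hp, if_pos hs, hG, pvSet_map_range _ hmn]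
        apply List.map_congr_left; intro c _
        by_cases hc : c = m
        · rw [hc, if_pos rfl, if_pos (Nat.lt_succ_self m)]
          simp only [pvStep, pvVal]
          rw [if_neg hp, if_pos hs]
        · rw [if_neg hc]
          by_cases hlt : c < m
          · rw [if_pos hlt, if_pos (by omega : c < m + 1)]
          · rw [if_neg hlt, if_neg (by omega : ¬ c < m + 1)]
      · rw [if_neg hp, if_neg hs]
        apply List.map_congr_left; intro c _
        by_cases hc : c = m
        · rw [hc, if_neg (Nat.lt_irrefl m), if_pos (Nat.lt_succ_self m)]
          simp only [pvStep]
          rw [if_neg hp, if_neg hs]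
        · by_cases hlt : c < m
          · rw [if_pos hlt, if_pos (by omega : c < m + 1)]
          · rw [if_neg hlt, if_neg (by omega : ¬ c < m + 1)]

theorem pvOuter_eq (ops : List String) :
    ∀ (rem rs : List (List String)),
      rem.foldl (fun res row =>
          (List.range (min row.length ops.length)).foldl (fun res col =>
            if ops.getD col "" = "+" then res.set col (res.getD col 0 + (PySem.Int.ofStr? (row.getD col "")).getD 0)
            else if ops.getD col "" = "*" then res.set col (res.getD col 0 * (PySem.Int.ofStr? (row.getD col "")).getD 0)
            else res) res)
        ((List.range ops.length).map (fun c => pvRed (ops.getD c "") (pvCol rs c)))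
      = (List.range ops.length).map (fun c => pvRed (ops.getD c "") (pvCol (rs ++ rem) c)) := by
  intro rem
  induction rem with
  | nil => intro rs; simp
  | cons row rem ih =>
    intro rs
    rw [List.foldl_cons,
        pvInner_eq ops row _ (min row.length ops.length) (Nat.min_le_right _ _)]
    have hstep : ((List.range ops.length).map
        (fun c => if c < min row.length ops.length
                  then pvStep ops row c (pvRed (ops.getD c "") (pvCol rs c))
                  else pvRed (ops.getD c "") (pvCol rs c)))
        = (List.range ops.length).map (fun c => pvRed (ops.getD c "") (pvCol (rs ++ [row]) c)) := by
      apply List.map_congr_left; intro c hc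
      rw [List.mem_range] at hc
      by_cases hr : c < row.length
      · rw [if_pos (by omega), pvCol_append, if_pos hr, pvRed_append]; rfl
      · rw [if_neg (by omega), pvCol_append, if_neg hr, List.append_nil]
    rw [hstep, ih (rs ++ [row])]
    simp

theorem pvInit_eq (ops : List String) :
    ops.map (fun op => if op = "+" then (0 : Int) else 1)
      = (List.range ops.length).map (fun c => pvRed (ops.getD c "") (pvCol [] c)) := by
  apply List.ext_getElem
  · simp
  · intro i h1 h2
    simp only [List.length_map] at h1
    have : ops.getD i "" = ops[i] := List.getD_eq_getElem ops "" h1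
    simp only [List.getElem_map, List.getElem_range, this, pvCol, List.foldl_nil, pvRed]
    split_ifs <;> rfl

theorem pvKey (ops : List String) (dataRows : List (List String)) :
    (((List.range ops.length).map (fun col =>
        (dataRows.foldl (fun acc row =>
            if col < row.length then acc ++ [(PySem.Int.ofStr? (row.getD col "")).getD 0] else acc) [],
         ops.getD col ""))).map (fun p =>
          if p.2 = "+" then p.1.sum
          else if p.2 = "*" then p.1.foldl (· * ·) 1
          else (1 : Int))).sum
    = (dataRows.foldl (fun res row =>
          (List.range (min row.length ops.length)).foldl (fun res col =>
            if ops.getD col "" = "+" then res.set col (res.getD col 0 + (PySem.Int.ofStr? (row.getD col "")).getD 0)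
            else if ops.getD col "" = "*" then res.set col (res.getD col 0 * (PySem.Int.ofStr? (row.getD col "")).getD 0)
            else res) res)
        (ops.map (fun op => if op = "+" then (0 : Int) else 1))).sum := by
  rw [pvInit_eq, pvOuter_eq ops dataRows []]
  simp only [List.map_map, List.nil_append]
  rfl

-- ===== VERDICT (by name: the statement is the Claim_ definition above) =====
theorem solve_cephalopod_worksheet_spec : Claim_equal_solve_cephalopod_worksheet := by
  intro w _ _
  exact pvKey ((pvRows w).getLastD []) ((pvRows w).dropLast)
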